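-- pv_equiv track=rewrite | github.com/Parean/computational_methods | 11.py | getNormM
-- ===== SOURCE A (Python) =====
-- def getNormM(a):
-- 	max = -1
-- 	for j in range(len(a[0])):
-- 		s = 0
-- 		for i in range(len(a)):
-- 			s += abs(a[i][j])
-- 		if(s > max):
-- 			max = s
--
-- 	return max
-- ===== SOURCE B (Python) =====
-- def getNormM(a):
--     cs = [0] * len(a[0])
--     for row in a:
--         cs = [c + abs(x) for c, x in zip(cs, row)]
--     return max(cs, default=-1)
-- ===== Notes on version B (the rewrite author's own statement) =====
-- stated objective: alternative
-- what changed: Replaces the column-major rescan (a scalar sum per column with the max updated inline) by a single row-major fold that zips a running column-sum vector with each row, followed by max(cs, default=-1).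
import Mathlib
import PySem

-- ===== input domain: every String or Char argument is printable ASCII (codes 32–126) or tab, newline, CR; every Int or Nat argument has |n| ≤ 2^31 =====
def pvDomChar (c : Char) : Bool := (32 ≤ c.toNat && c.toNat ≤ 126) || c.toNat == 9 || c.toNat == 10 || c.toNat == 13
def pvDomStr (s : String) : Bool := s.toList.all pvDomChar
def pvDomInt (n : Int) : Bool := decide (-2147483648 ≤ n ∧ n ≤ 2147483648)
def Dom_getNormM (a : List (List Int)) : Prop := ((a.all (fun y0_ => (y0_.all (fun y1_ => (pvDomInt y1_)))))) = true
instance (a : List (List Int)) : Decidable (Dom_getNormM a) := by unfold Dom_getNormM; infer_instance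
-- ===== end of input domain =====

-- B replaces the column-major rescan by one row-major fold zipping a running
-- column-sum vector with each row, then max with default -1; alternative decomposition, same cost.

-- ===== PORT A =====
-- column-major: for each j < len(a[0]), sum |a[i][j]| over i, update max (init -1)
def getNormM (a : List (List Int)) : Int :=
  let n : Int := (((PySem.List.pyGet? a 0).getD []).length : Int)
  (PySem.List.pyRange 0 n 1).foldl (fun mx j =>
    let s := (PySem.List.pyRange 0 (a.length : Int) 1).foldl
      (fun s i => s + |PySem.List.pyGetD (PySem.List.pyGetD a i []) j 0|) 0
    if s > mx then s else mx) (-1)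

-- ===== PORT B =====
-- row-major: fold the rows, zipping the column-sum vector with each row; max(cs, default=-1)
def getNormM_alt (a : List (List Int)) : Int :=
  let cs := a.foldl
    (fun cs row => (cs.zip row).map (fun p => p.1 + |p.2|))
    (List.replicate (((PySem.List.pyGet? a 0).getD []).length) (0 : Int))
  PySem.List.maxD cs (fun y => y) (-1)

-- ===== PRECONDITION & SPEC =====
-- Pre_ excludes exactly the inputs where the Python A raises IndexError:
-- the empty matrix (a[0]) and ragged matrices with a row shorter than the first row.
def Pre_getNormM (a : List (List Int)) : Prop :=
  a ≠ [] ∧ ∀ r ∈ a, (a.headD []).length ≤ r.length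
instance (a : List (List Int)) : Decidable (Pre_getNormM a) := by unfold Pre_getNormM; infer_instance
def pvWitness_getNormM : List (List Int) := [[1, -2], [3, 4]]

def Spec_getNormM (a : List (List Int)) (out : Int) : Prop := out = getNormM_alt a
instance (a : List (List Int)) (out : Int) : Decidable (Spec_getNormM a out) := by unfold Spec_getNormM; infer_instance

-- ===== CLAIM (what is proved, stated in full; the proofs are below) =====
def Claim_equal_getNormM : Prop := ∀ (a : List (List Int)), Dom_getNormM a → Pre_getNormM a → Spec_getNormM a (getNormM a)

-- ===== LEMMAS AND PROOFS =====

-- zipping the sum vector with a row (row at least as long) updates it pointwise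
theorem zip_map_abs (cs row : List Int) (h : cs.length ≤ row.length) :
    (cs.zip row).map (fun p => p.1 + |p.2|)
      = (List.range cs.length).map (fun j => cs.getD j 0 + |row.getD j 0|) := by
  induction cs generalizing row with
  | nil => simp
  | cons c t ih =>
      cases row with
      | nil => simp at h
      | cons x r =>
          simp only [List.zip_cons_cons, List.map_cons, List.length_cons,
            List.range_succ_eq_map, List.map_map]
          refine congrArg₂ List.cons (by simp) ?_
          have := ih r (by simpa using h)
          simpa [List.map_map, Function.comp_def, List.getD_cons_succ] using this

-- invariant for B's row fold: the column-sum vector stays a map over column indices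
theorem cs_fold_inv (t : List (List Int)) (n : Nat) (g : Nat → Int)
    (h : ∀ r ∈ t, n ≤ r.length) :
    t.foldl
      (fun cs row => (cs.zip row).map (fun p => p.1 + |p.2|))
      ((List.range n).map g)
    = (List.range n).map (fun j => t.foldl (fun s r => s + |r.getD j 0|) (g j)) := by
  induction t generalizing g with
  | nil => simp
  | cons r t ih =>
      simp only [List.foldl_cons]
      rw [zip_map_abs _ r (by simpa using h r (by simp))]
      have h1 : (List.range (((List.range n).map g).length)).map
            (fun j => ((List.range n).map g).getD j 0 + |r.getD j 0|)
          = (List.range n).map (fun j => g j + |r.getD j 0|) := by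
        simp only [List.length_map, List.length_range]
        apply List.map_congr_left
        intro j hj
        rw [PySem.List.getD_map_range g n j 0 (List.mem_range.mp hj)]
      rw [h1, ih (fun j => g j + |r.getD j 0|) (fun r hr => h r (by simp [hr]))]

-- the running column sums are nonnegative
theorem colsum_nonneg (t : List (List Int)) (j : Nat) (init : Int) (h : 0 ≤ init) :
    0 ≤ t.foldl (fun s r => s + |r.getD j 0|) init := by
  induction t generalizing init with
  | nil => simpa
  | cons r t ih => exact ih _ (by positivity)

-- Python's running-max loop with init -1 equals max(l, default=-1) on nonnegative lists
theorem foldl_if_max (l : List Int) (h : ∀ y ∈ l, (0 : Int) ≤ y) :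
    l.foldl (fun mx s => if s > mx then s else mx) (-1)
      = PySem.List.maxD l (fun y => y) (-1) := by
  cases l with
  | nil => decide
  | cons x t =>
      have hstep : ∀ (i : Int) (u : List Int),
          u.foldl (fun mx s => if s > mx then s else mx) i = u.foldl max i := by
        intro i u
        induction u generalizing i with
        | nil => rfl
        | cons y u ih =>
            simp only [List.foldl_cons, ih]
            congr 1
            rcases lt_or_ge i y with h' | h' <;> simp [max_def] <;> omega
      rw [PySem.List.maxD, PySem.List.max?_id_cons, Option.getD_some, hstep]
      have hx : max (-1 : Int) x = x := by
        have := h x (by simp); omega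
      simp [List.foldl_cons, hx]

theorem getNormM_spec_aux (a : List (List Int)) (hpre : Pre_getNormM a) :
    getNormM a = getNormM_alt a := by
  obtain ⟨hne, hlen⟩ := hpre
  unfold getNormM getNormM_alt
  obtain ⟨r0, t, rfl⟩ : ∃ r0 t, a = r0 :: t := by
    cases a with
    | nil => exact absurd rfl hne
    | cons r0 t => exact ⟨r0, t, rfl⟩
  set A := r0 :: t with hA
  have hget0 : (PySem.List.pyGet? A 0).getD [] = r0 := by
    simp [PySem.List.pyGet?, PySem.List.pyIdx?, hA]
  set n : Nat := r0.length with hn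
  have hlen' : ∀ r ∈ A, n ≤ r.length := by
    intro r hr; simpa [hn] using hlen r hr
  -- rewrite B's replicate as a range map and apply the fold invariant
  have hrep : (List.replicate r0.length (0 : Int))
      = (List.range n).map (fun _ => (0 : Int)) := by
    simp [hn, List.map_const']
  rw [hget0, hrep, cs_fold_inv A n (fun _ => 0) hlen']
  -- rewrite A's inner loop over indices as a fold over the rows
  have hS2 : ∀ jn : Nat,
      List.foldl (fun x i => x + |(A.getD i []).getD jn 0|) 0 (List.range A.length)
        = List.foldl (fun s r => s + |r.getD jn 0|) 0 A := by
    intro jn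
    have := PySem.List.foldl_pyRange_zero_pyGetD A []
      (fun s r => s + |PySem.List.pyGetD r (jn : Int) 0|) 0
    simpa [PySem.List.len, PySem.List.pyRange_zero_nat, List.foldl_map,
      PySem.List.pyGetD_natCast] using this
  -- both sides are now folds over the same list of column sums
  rw [← foldl_if_max _ (by
    intro y hy
    simp only [List.mem_map, List.mem_range] at hy
    obtain ⟨j, _, rfl⟩ := hy
    exact colsum_nonneg A j 0 le_rfl)]
  simp only [PySem.List.pyRange_zero_nat, List.foldl_map,
    PySem.List.pyGetD_natCast, hS2, hn]

-- ===== VERDICT (by name: the statement is the Claim_ definition above) =====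
theorem getNormM_spec : Claim_equal_getNormM := by
  intro a _ hpre
  exact getNormM_spec_aux a hpre
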